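-- pv_equiv track=rewrite | github.com/dashuncel/python_formats | hw23_json.py | det_frequency
-- ===== SOURCE A (Python) =====
-- def det_frequency(text):
--     wordlist = text.lower().split(None)
--     frequencies = {}
--     for word in wordlist:
--         if len(word) < 6:
--             continue
--         if word in frequencies:
--             frequencies[word] += 1
--         else:
--             frequencies[word] = 1
--
--     return frequencies
-- ===== SOURCE B (Python) =====
-- def det_frequency(text):
--     ws = [w for w in text.lower().split() if len(w) >= 6]
--     frequencies = {}
--     while ws:
--         w = ws[0]
--         rest = [x for x in ws if x != w]
--         frequencies[w] = len(ws) - len(rest)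
--         ws = rest
--     return frequencies
-- ===== Notes on version B (the rewrite author's own statement) =====
-- stated objective: alternative
-- what changed: Replaces the per-word membership-test-and-increment dict counting by a count-and-remove worklist: repeatedly take the first remaining long word, compute its whole count at once as the length drop when all its occurrences are filtered out, and continue on the shrunken list.
import Mathlib
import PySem

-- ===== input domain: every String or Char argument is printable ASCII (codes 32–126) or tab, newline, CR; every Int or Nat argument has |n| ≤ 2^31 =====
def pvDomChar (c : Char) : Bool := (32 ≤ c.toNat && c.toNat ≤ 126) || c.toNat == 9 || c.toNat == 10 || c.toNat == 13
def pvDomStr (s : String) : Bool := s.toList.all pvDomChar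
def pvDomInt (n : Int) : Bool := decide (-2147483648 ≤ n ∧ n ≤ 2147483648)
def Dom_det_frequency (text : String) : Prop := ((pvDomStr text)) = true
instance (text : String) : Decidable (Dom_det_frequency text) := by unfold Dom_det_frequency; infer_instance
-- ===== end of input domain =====

-- B counts by count-and-remove: take the first remaining long word, obtain its whole count
-- as the length drop when all its occurrences are removed, then continue on the shrunken
-- list (alternative decomposition, not faster).

-- ===== PORT A =====
def det_frequency (text : String) : List (String × Int) :=
  let wordlist := PySem.Str.split₀ (PySem.Str.lower text)
  (wordlist.foldl (fun frequencies word =>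
      if PySem.Str.len word < 6 then frequencies
      else if frequencies.contains word then
        frequencies.insert word (frequencies.getD word 0 + 1)
      else frequencies.insert word 1)
    PySem.Dict.empty).items

-- ===== PORT B =====
-- the 'while ws:' loop of Source B: recursion on the shrinking worklist
def pvTallyLoop : List String → PySem.Dict String Int → PySem.Dict String Int
  | [], frequencies => frequencies
  | w :: t, frequencies =>
      let ws := w :: t
      let rest := ws.filter (fun x => x ≠ w)
      pvTallyLoop rest (frequencies.insert w ((ws.length : Int) - (rest.length : Int)))
  termination_by ws => ws.length
  decreasing_by
    simp only [List.filter_cons, ne_eq, not_true_eq_false, decide_false,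
      List.length_cons]
    exact Nat.lt_succ_of_le (List.length_filter_le _ _)

def det_frequency_alt (text : String) : List (String × Int) :=
  let ws := (PySem.Str.split₀ (PySem.Str.lower text)).filter
      (fun w => decide (6 ≤ PySem.Str.len w))
  (pvTallyLoop ws PySem.Dict.empty).items

-- ===== PRECONDITION & SPEC =====
def Spec_det_frequency (text : String) (out : List (String × Int)) : Prop := out = det_frequency_alt text
instance (text : String) (out : List (String × Int)) : Decidable (Spec_det_frequency text out) := by unfold Spec_det_frequency; infer_instance

-- ===== CLAIM (what is proved, stated in full; the proofs are below) =====
def Claim_equal_det_frequency : Prop := ∀ (text : String), Dom_det_frequency text → Spec_det_frequency text (det_frequency text)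

-- ===== LEMMAS AND PROOFS =====

-- A dict absent key looks up to none.
theorem pv_get?_of_not_contains {κ ν : Type} [BEq κ] (d : PySem.Dict κ ν) (k : κ)
    (h : d.contains k = false) : d.get? k = none := by
  simp only [PySem.Dict.contains, List.any_eq_false] at h
  simp only [PySem.Dict.get?, List.find?_eq_none.mpr h, Option.map_none]

-- A's loop over all words equals the increment loop over the filtered words.
theorem pv_A_filter (ws : List String) :
    ws.foldl (fun frequencies word =>
        if PySem.Str.len word < 6 then frequencies
        else if frequencies.contains word then
          frequencies.insert word (frequencies.getD word 0 + 1)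
        else frequencies.insert word 1) (PySem.Dict.empty : PySem.Dict String Int)
      = (ws.filter (fun w => decide (6 ≤ PySem.Str.len w))).foldl
          (fun d w => d.insert w (d.getD w 0 + 1)) PySem.Dict.empty := by
  rw [List.foldl_filter]
  apply List.foldl_ext
  intro d w _
  have hz : d.contains w = false → d.getD w 0 = 0 := fun h =>
    by simp [PySem.Dict.getD, pv_get?_of_not_contains d w h]
  by_cases h6 : PySem.Str.len w < 6
  · rw [if_pos h6, if_neg (by simp only [decide_eq_true_eq, not_le]; omega)]
  · rw [if_neg h6, if_pos (show decide (6 ≤ PySem.Str.len w) = true by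
      simp only [decide_eq_true_eq]; omega)]
    by_cases hc : d.contains w = true
    · rw [if_pos hc]
    · rw [if_neg hc, hz (by simpa using hc)]
      norm_num

-- count + length-of-complement = length
theorem pv_count_add_filter (w : String) (l : List String) :
    l.count w + (l.filter (fun x => x ≠ w)).length = l.length := by
  simp only [ne_eq]
  induction l with
  | nil => rfl
  | cons a t ih =>
      by_cases h : a = w
      · subst h
        simp only [List.count_cons_self, List.filter_cons, not_true_eq_false,
          decide_false, Bool.false_eq_true, if_false, List.length_cons]
        omega
      · simp only [List.count_cons_of_ne h, List.filter_cons, ne_eq, h, not_false_eq_true,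
          decide_true, if_true, List.length_cons]
        omega

-- removing a different word does not change a count
theorem pv_count_filter_ne (w k : String) (l : List String) (hk : k ≠ w) :
    (l.filter (fun x => x ≠ w)).count k = l.count k := by
  simp only [ne_eq]
  induction l with
  | nil => rfl
  | cons a t ih =>
      by_cases h : a = w
      · subst h
        simp only [List.filter_cons, not_true_eq_false, decide_false,
          Bool.false_eq_true, if_false, ih, List.count_cons_of_ne (Ne.symm hk)]
      · simp only [List.filter_cons, h, not_false_eq_true, decide_true, if_true,
          List.count_cons, ih]

-- folding Set.add skips elements already present
theorem pv_foldl_add_filter (w : String) (l : List String) (s : List String) (hw : w ∈ s) :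
    l.foldl PySem.Set.add s = (l.filter (fun x => x ≠ w)).foldl PySem.Set.add s := by
  induction l generalizing s with
  | nil => rfl
  | cons a t ih =>
      by_cases h : a = w
      · subst h
        have : PySem.Set.add s a = s := by
          simp [PySem.Set.add, PySem.Set.contains, hw]
        simp only [List.filter_cons, ne_eq, not_true_eq_false, decide_false,
          Bool.false_eq_true, if_false, List.foldl_cons, this, ih s hw]
      · simp only [List.filter_cons, ne_eq, h, not_false_eq_true, decide_true, if_true,
          List.foldl_cons]
        exact ih _ (by simp [PySem.Set.mem_add, hw])

-- a fresh head element stays at the front of the fold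
theorem pv_foldl_add_cons (w : String) (l : List String) (s : List String) (hw : w ∉ l) :
    l.foldl PySem.Set.add (w :: s) = w :: l.foldl PySem.Set.add s := by
  induction l generalizing s with
  | nil => rfl
  | cons a t ih =>
      have ha : a ≠ w := fun h => hw (h ▸ List.mem_cons_self)
      have hw' : w ∉ t := fun h => hw (List.mem_cons_of_mem _ h)
      have hcontains : PySem.Set.contains (w :: s) a = PySem.Set.contains s a := by
        simp [PySem.Set.contains, ha]
      by_cases hc : PySem.Set.contains s a = true
      · simp only [List.foldl_cons, PySem.Set.add, hcontains, hc, if_pos, ih _ hw']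
      · simp only [List.foldl_cons, PySem.Set.add, hcontains, hc, Bool.false_eq_true, if_false,
          List.cons_append, ih _ hw']

-- set(w :: t) = w :: set(t with w removed)
theorem pv_ofList_cons (w : String) (t : List String) :
    PySem.Set.ofList (w :: t) = w :: PySem.Set.ofList (t.filter (fun x => x ≠ w)) := by
  have h0 : PySem.Set.ofList (w :: t) = t.foldl PySem.Set.add [w] := by
    simp [PySem.Set.ofList_eq_foldl, PySem.Set.add, PySem.Set.contains]
  rw [h0, pv_foldl_add_filter w t [w] (List.mem_singleton.mpr rfl),
    pv_foldl_add_cons w _ [] (by simp), PySem.Set.ofList_eq_foldl]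

-- the worklist loop produces exactly Counter-as-items appended to the accumulator
theorem pv_tallyLoop_items (ws : List String) (d : PySem.Dict String Int)
    (hf : ∀ k ∈ ws, d.contains k = false) :
    (pvTallyLoop ws d).items
      = d.items ++ (PySem.Set.ofList ws).map (fun k => (k, (ws.count k : Int))) := by
  induction ws, d using pvTallyLoop.induct with
  | case1 => simp [pvTallyLoop]
  | case2 w t d ws' rest ih =>
      have hrest : rest = t.filter (fun x => x ≠ w) := by
        simp only [rest, ws', List.filter_cons, ne_eq, not_true_eq_false, decide_false,
          Bool.false_eq_true, if_false]
      have hm : ∀ x ∈ rest, x ∈ t ∧ x ≠ w := by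
        intro x hx
        rw [hrest] at hx
        have := List.mem_filter.mp hx
        exact ⟨this.1, by simpa using this.2⟩
      rw [pvTallyLoop]
      have hdc : d.contains w = false := hf w List.mem_cons_self
      rw [ih (fun k hk => by
        rw [PySem.Dict.contains_insert]
        have ⟨hkt, hkw⟩ := hm k hk
        simp [hkw, hf k (List.mem_cons_of_mem _ hkt)])]
      rw [PySem.Dict.items_insert]
      simp only [hdc, Bool.false_eq_true, if_false]
      rw [List.append_assoc, List.singleton_append]
      congr 1
      have hcount : ((ws'.length : Int) - (rest.length : Int)) = (ws'.count w : Int) := by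
        have h := pv_count_add_filter w ws'
        have hr : rest.length = (ws'.filter (fun x => x ≠ w)).length := rfl
        omega
      rw [show (ws' : List String) = w :: t from rfl, pv_ofList_cons, ← hrest, List.map_cons]
      congr 1
      · rw [hcount]
      · apply List.map_congr_left
        intro k hk
        have hkrest : k ∈ rest := (PySem.Set.mem_ofList _ _).mp hk
        have hkw : k ≠ w := (hm k hkrest).2
        rw [hrest, pv_count_filter_ne w k t hkw, List.count_cons_of_ne (Ne.symm hkw)]

-- ===== VERDICT (by name: the statement is the Claim_ definition above) =====
theorem det_frequency_spec : Claim_equal_det_frequency := by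
  intro text _
  unfold Spec_det_frequency det_frequency det_frequency_alt
  dsimp only
  rw [pv_A_filter, PySem.Dict.foldl_insert_getD_add_one_eq_counter, PySem.Dict.items_counter,
    pv_tallyLoop_items _ _ (fun k _ => PySem.Dict.contains_empty k),
    show (PySem.Dict.empty : PySem.Dict String Int).items = [] from rfl, List.nil_append]
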